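-- pv_equiv track=rewrite | github.com/riccardo-ugo-alberti/quant-insight-dashboard | app/main.py | _sanitize_tickers
-- ===== SOURCE A (Python) =====
-- def _sanitize_tickers(raw: str) -> tuple[list[str], list[str]]:
--     parsed = [t.strip().upper() for t in raw.split(",") if t.strip()]
--     seen = set()
--     clean = []
--     duplicates = []
--     for t in parsed:
--         if t in seen:
--             duplicates.append(t)
--             continue
--         seen.add(t)
--         clean.append(t)
--     return clean, duplicates
-- ===== SOURCE B (Python) =====
-- def _sanitize_tickers(raw: str) -> tuple[list[str], list[str]]:
--     parsed = [t.strip().upper() for t in raw.split(",") if t.strip()]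
--     clean = list(dict.fromkeys(parsed))
--     duplicates = list(parsed)
--     for t in clean:
--         duplicates.remove(t)
--     return clean, duplicates
-- ===== Notes on version B (the rewrite author's own statement) =====
-- stated objective: idiomatic
-- what changed: Replaces the single seen-set loop with dict.fromkeys for order-preserving dedup plus a second pass that removes one first occurrence of each unique ticker from a copy of parsed, leaving the duplicates in encounter order.
import Mathlib
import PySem

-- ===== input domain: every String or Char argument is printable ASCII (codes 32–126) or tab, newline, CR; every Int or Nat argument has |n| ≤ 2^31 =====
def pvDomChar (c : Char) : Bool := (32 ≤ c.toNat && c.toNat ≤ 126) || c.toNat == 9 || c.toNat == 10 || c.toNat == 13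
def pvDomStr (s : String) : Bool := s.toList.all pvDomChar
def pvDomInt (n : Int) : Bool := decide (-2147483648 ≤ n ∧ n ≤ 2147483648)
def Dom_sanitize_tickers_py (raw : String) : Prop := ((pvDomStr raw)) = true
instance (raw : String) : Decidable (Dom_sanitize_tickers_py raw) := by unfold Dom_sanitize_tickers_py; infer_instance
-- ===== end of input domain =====

-- B replaces A's single seen-set loop by dict.fromkeys dedup plus a second pass that
-- removes one first occurrence of each unique ticker, leaving the duplicates (idiomatic; same cost).

-- ===== PORT A =====
def sanitize_tickers_py (raw : String) : List String × List String :=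
  let parsed : List String :=
    ((PySem.Chars.splitOn raw.toList [',']).filter
        (fun t => !(PySem.Chars.strip t).isEmpty)).map
      (fun t => String.ofList (PySem.Chars.upper (PySem.Chars.strip t)))
  let st := parsed.foldl
    (fun (st : PySem.Set String × List String × List String) t =>
      if st.1.contains t then (st.1, st.2.1, st.2.2 ++ [t])
      else (PySem.Set.add st.1 t, st.2.1 ++ [t], st.2.2))
    (PySem.Set.empty, [], [])
  (st.2.1, st.2.2)

-- ===== PORT B =====
def sanitize_tickers_py_alt (raw : String) : List String × List String :=
  let parsed : List String :=
    ((PySem.Chars.splitOn raw.toList [',']).filter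
        (fun t => !(PySem.Chars.strip t).isEmpty)).map
      (fun t => String.ofList (PySem.Chars.upper (PySem.Chars.strip t)))
  let clean := PySem.List.dedup parsed
  let duplicates := clean.foldl (fun acc t => (PySem.List.remove? acc t).getD acc) parsed
  (clean, duplicates)

-- ===== PRECONDITION & SPEC =====
def Spec_sanitize_tickers_py (raw : String) (out : List String × List String) : Prop := out = sanitize_tickers_py_alt raw
instance (raw : String) (out : List String × List String) : Decidable (Spec_sanitize_tickers_py raw out) := by unfold Spec_sanitize_tickers_py; infer_instance

-- ===== CLAIM (what is proved, stated in full; the proofs are below) =====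
def Claim_equal_sanitize_tickers_py : Prop := ∀ (raw : String), Dom_sanitize_tickers_py raw → Spec_sanitize_tickers_py raw (sanitize_tickers_py raw)

-- ===== LEMMAS AND PROOFS =====

-- the tickers A's loop appends to `clean` (resp. `duplicates`) when started with seen-set s
def pvCleanF (s : PySem.Set String) : List String → List String
  | [] => []
  | x :: xs => if x ∈ s then pvCleanF s xs else x :: pvCleanF (PySem.Set.add s x) xs

def pvDupF (s : PySem.Set String) : List String → List String
  | [] => []
  | x :: xs => if x ∈ s then x :: pvDupF s xs else pvDupF (PySem.Set.add s x) xs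

lemma pvALoop (l : List String) : ∀ (s : PySem.Set String) (c d : List String),
    l.foldl (fun (st : PySem.Set String × List String × List String) t =>
        if st.1.contains t then (st.1, st.2.1, st.2.2 ++ [t])
        else (PySem.Set.add st.1 t, st.2.1 ++ [t], st.2.2)) (s, c, d)
      = (l.foldl PySem.Set.add s, c ++ pvCleanF s l, d ++ pvDupF s l) := by
  induction l with
  | nil => simp [pvCleanF, pvDupF]
  | cons x xs ih =>
    intro s c d
    rw [List.foldl_cons, List.foldl_cons]
    by_cases h : x ∈ s
    · rw [if_pos (show (s.contains x) = true by simpa using h), ih]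
      simp [pvCleanF, pvDupF, PySem.Set.add, h, List.append_assoc]
    · rw [if_neg (show ¬ (s.contains x) = true by simpa using h), ih]
      simp [pvCleanF, pvDupF, h, List.append_assoc]

lemma pvOfListEq (l : List String) : ∀ s : PySem.Set String,
    l.foldl PySem.Set.add s = s ++ pvCleanF s l := by
  induction l with
  | nil => simp [pvCleanF]
  | cons x xs ih =>
    intro s
    by_cases h : x ∈ s
    · simp [pvCleanF, h, PySem.Set.add, ih]
    · simp [pvCleanF, h, PySem.Set.add, ih]

lemma pvCleanF_not_mem_seen (l : List String) : ∀ (s : PySem.Set String) (c : String),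
    c ∈ pvCleanF s l → c ∉ s := by
  induction l with
  | nil => simp [pvCleanF]
  | cons x xs ih =>
    intro s c hc
    by_cases h : x ∈ s
    · rw [pvCleanF, if_pos h] at hc
      exact ih s c hc
    · rw [pvCleanF, if_neg h] at hc
      rcases List.mem_cons.mp hc with rfl | hc
      · exact h
      · have := ih (PySem.Set.add s x) c hc
        simp [PySem.Set.add, h] at this
        exact this.1

lemma pvFoldRemCons (x : String) : ∀ (C xs : List String), (∀ c ∈ C, c ≠ x) →
    C.foldl (fun acc t => (PySem.List.remove? acc t).getD acc) (x :: xs)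
      = x :: C.foldl (fun acc t => (PySem.List.remove? acc t).getD acc) xs := by
  intro C
  induction C with
  | nil => simp
  | cons c C' ih =>
    intro xs h
    have hcx : x ≠ c := fun e => (h c (List.mem_cons_self ..)) e.symm
    simp only [List.foldl_cons]
    rw [PySem.List.remove?_cons_of_ne xs hcx]
    have hsub : ∀ c' ∈ C', c' ≠ x := fun c' hc' => h c' (List.mem_cons_of_mem _ hc')
    cases hr : PySem.List.remove? xs c with
    | none => simp only [Option.map_none, Option.getD_none]; exact ih xs hsub
    | some r => simp only [Option.map_some, Option.getD_some]; exact ih r hsub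

lemma pvBDups (l : List String) : ∀ s : PySem.Set String,
    (pvCleanF s l).foldl (fun acc t => (PySem.List.remove? acc t).getD acc) l = pvDupF s l := by
  induction l with
  | nil => intro s; simp [pvCleanF, pvDupF]
  | cons x xs ih =>
    intro s
    by_cases h : x ∈ s
    · rw [pvCleanF, if_pos h, pvDupF, if_pos h]
      rw [pvFoldRemCons x (pvCleanF s xs) xs
        (fun c hc he => pvCleanF_not_mem_seen xs s c hc (he ▸ h))]
      rw [ih s]
    · rw [pvCleanF, if_neg h, pvDupF, if_neg h,
        List.foldl_cons, PySem.List.remove?_cons_self]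
      simpa using ih (PySem.Set.add s x)

-- ===== VERDICT (by name: the statement is the Claim_ definition above) =====
theorem sanitize_tickers_py_spec : Claim_equal_sanitize_tickers_py := by
  intro raw _
  unfold Spec_sanitize_tickers_py sanitize_tickers_py sanitize_tickers_py_alt
  simp only [PySem.List.dedup_eq_ofList, PySem.Set.ofList, PySem.Set.empty]
  rw [pvALoop, pvOfListEq]
  simp only [List.nil_append]
  rw [pvBDups]
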